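-- pv_equiv track=rewrite | github.com/kankang20/Baekjoon | 02 백준/10 문자열/Python/Prob4659.py | check_triple
-- ===== SOURCE A (Python) =====
-- def check_triple(password):
--
--     left_count, right_count = 0, 0
--
--     for word in password:
--
--         if word in ['a','e','i','o','u']:
--             left_count += 1
--             right_count = 0
--         else:
--             left_count = 0
--             right_count += 1
--
--         if left_count == 3 or right_count == 3:
--             return False
--
--     return True
-- ===== SOURCE B (Python) =====
-- def check_triple(password):
--     kinds = [c in 'aeiou' for c in password]
--     return all(a != b or b != c for a, b, c in zip(kinds, kinds[1:], kinds[2:]))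
-- ===== Notes on version B (the rewrite author's own statement) =====
-- stated objective: idiomatic
-- what changed: Replaces the two running counters with an early return by a stateless sliding-window check: classify each char as vowel/consonant once, then test every window of three consecutive classes for equality.
import Mathlib
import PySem

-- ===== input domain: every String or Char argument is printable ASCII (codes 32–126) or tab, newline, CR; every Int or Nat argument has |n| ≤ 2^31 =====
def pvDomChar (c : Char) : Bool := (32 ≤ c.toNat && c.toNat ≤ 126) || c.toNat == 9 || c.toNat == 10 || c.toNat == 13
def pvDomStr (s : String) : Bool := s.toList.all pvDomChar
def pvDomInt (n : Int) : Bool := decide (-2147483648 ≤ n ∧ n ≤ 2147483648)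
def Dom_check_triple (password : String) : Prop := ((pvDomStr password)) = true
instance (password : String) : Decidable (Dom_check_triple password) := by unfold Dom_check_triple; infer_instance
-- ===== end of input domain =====

-- B replaces A's two running counters (with early return) by a stateless check of every
-- window of three consecutive vowel/consonant classes; same O(n) cost, more idiomatic.

-- ===== PORT A =====
-- loop over the chars with the two counters; early 'return False' becomes returning false
def checkLoopA : List Char → Int → Int → Bool
  | [], _, _ => true
  | w :: ws, left_count, right_count =>
    let s := if ['a','e','i','o','u'].contains w
             then (left_count + 1, (0 : Int))
             else ((0 : Int), right_count + 1)
    if s.1 == 3 || s.2 == 3 then false else checkLoopA ws s.1 s.2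

def check_triple (password : String) : Bool :=
  checkLoopA password.toList 0 0

-- ===== PORT B =====
-- c in 'aeiou'
def kindB (c : Char) : Bool := "aeiou".toList.contains c

-- all(a != b or b != c for a, b, c in zip(kinds, kinds[1:], kinds[2:]))
def allWindows : List Bool → Bool
  | a :: b :: c :: t => if a == b && b == c then false else allWindows (b :: c :: t)
  | _ => true

def check_triple_alt (password : String) : Bool :=
  allWindows (password.toList.map kindB)

-- ===== PRECONDITION & SPEC =====
def Spec_check_triple (password : String) (out : Bool) : Prop := out = check_triple_alt password
instance (password : String) (out : Bool) : Decidable (Spec_check_triple password out) := by unfold Spec_check_triple; infer_instance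

-- ===== CLAIM (what is proved, stated in full; the proofs are below) =====
def Claim_equal_check_triple : Prop := ∀ (password : String), Dom_check_triple password → Spec_check_triple password (check_triple password)

-- ===== LEMMAS AND PROOFS =====

-- dropping a leading class different from the next one does not change the window check
theorem allWindows_cons_ne (a b : Bool) {t : List Bool} (h : a ≠ b) :
    allWindows (a :: b :: t) = allWindows (b :: t) := by
  cases t with
  | nil => simp [allWindows]
  | cons c t => simp [allWindows, h]

-- the 5 reachable counter states correspond to a virtual run-prefix before the remaining keys
theorem loop_eq (ws : List Char) :
    (checkLoopA ws 0 0 = allWindows (ws.map kindB)) ∧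
    (checkLoopA ws 1 0 = allWindows (true :: ws.map kindB)) ∧
    (checkLoopA ws 2 0 = allWindows (true :: true :: ws.map kindB)) ∧
    (checkLoopA ws 0 1 = allWindows (false :: ws.map kindB)) ∧
    (checkLoopA ws 0 2 = allWindows (false :: false :: ws.map kindB)) := by
  induction ws with
  | nil => simp [checkLoopA, allWindows]
  | cons w ws ih =>
    obtain ⟨h00, h10, h20, h01, h02⟩ := ih
    by_cases hv : w = 'a' ∨ w = 'e' ∨ w = 'i' ∨ w = 'o' ∨ w = 'u'
    · have hk : kindB w = true := by simp [kindB]; tauto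
      refine ⟨?_, ?_, ?_, ?_, ?_⟩ <;>
        simp [checkLoopA, hv, List.map_cons, hk, h10, h20, allWindows,
          allWindows_cons_ne false true (by decide)]
    · have hk : kindB w = false := by simp [kindB]; tauto
      refine ⟨?_, ?_, ?_, ?_, ?_⟩ <;>
        simp [checkLoopA, hv, List.map_cons, hk, h01, h02, allWindows,
          allWindows_cons_ne true false (by decide)]

-- ===== VERDICT (by name: the statement is the Claim_ definition above) =====
theorem check_triple_spec : Claim_equal_check_triple := by
  intro password _
  unfold Spec_check_triple check_triple check_triple_alt
  exact (loop_eq password.toList).1
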